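-- pv_equiv track=rewrite | github.com/codeislife99/Daily_Coding_Problems_Solutions | 157.py | solve
-- ===== SOURCE A (Python) =====
-- def solve(string):
-- 	S = set()
-- 	for char in string:
-- 		if char in S:
-- 			S.remove(char)
-- 		else:
-- 			S.add(char)
-- 	return len(S)==len(string)%2
-- ===== SOURCE B (Python) =====
-- def solve(string):
--     counts = {}
--     for ch in string:
--         counts[ch] = counts.get(ch, 0) + 1
--     odd = sum(1 for v in counts.values() if v % 2)
--     return odd <= 1
-- ===== Notes on version B (the rewrite author's own statement) =====
-- stated objective: idiomatic
-- what changed: Replaces A's single-pass parity-toggle set (add/remove per character, then compare set size to len%2) with a two-pass frequency table: build character counts in a dict, then count values with odd frequency and test odd <= 1.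
import Mathlib
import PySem

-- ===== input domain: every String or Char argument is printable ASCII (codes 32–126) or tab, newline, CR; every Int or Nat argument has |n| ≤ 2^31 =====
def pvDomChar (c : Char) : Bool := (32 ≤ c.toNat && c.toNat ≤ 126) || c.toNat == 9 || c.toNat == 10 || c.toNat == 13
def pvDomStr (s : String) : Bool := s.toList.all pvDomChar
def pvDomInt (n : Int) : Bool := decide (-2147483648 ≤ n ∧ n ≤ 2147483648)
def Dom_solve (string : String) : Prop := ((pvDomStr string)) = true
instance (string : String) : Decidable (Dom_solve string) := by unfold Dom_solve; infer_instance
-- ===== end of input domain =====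

-- B replaces A's parity-toggle set with a two-pass frequency table: build character
-- counts once, then test that at most one character has an odd count (idiomatic; same cost).

-- ===== PORT A =====
-- A's loop: toggle membership of char in the set S (remove under the 'char in S'
-- guard, where Python's remove coincides with discard; add otherwise).
def solve (string : String) : Bool :=
  let S := string.toList.foldl
    (fun S char =>
      if PySem.Set.contains S char then PySem.Set.discard S char
      else PySem.Set.add S char)
    (PySem.Set.empty : PySem.Set Char)
  decide ((PySem.Set.len S : Int) = PySem.Int.mod (string.toList.length : Int) 2)

-- ===== PORT B =====
-- B's first pass: counts[ch] = counts.get(ch, 0) + 1; second pass: sum of 1 over odd values.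
def solve_alt (string : String) : Bool :=
  let counts := string.toList.foldl
    (fun d ch => d.insert ch (d.getD ch 0 + 1))
    (PySem.Dict.empty : PySem.Dict Char Int)
  let odd := (counts.values.map
    (fun v => if PySem.Int.mod v 2 ≠ 0 then (1 : Int) else 0)).sum
  decide (odd ≤ 1)

-- ===== PRECONDITION & SPEC =====
def Spec_solve (string : String) (out : Bool) : Prop := out = solve_alt string
instance (string : String) (out : Bool) : Decidable (Spec_solve string out) := by unfold Spec_solve; infer_instance

-- ===== CLAIM (what is proved, stated in full; the proofs are below) =====
def Claim_equal_solve : Prop := ∀ (string : String), Dom_solve string → Spec_solve string (solve string)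

-- ===== LEMMAS AND PROOFS =====

-- A's fold result: a Nodup set whose members are exactly the odd-count characters.
theorem pv_toggle_spec (l : List Char) :
    (l.foldl (fun S char =>
        if PySem.Set.contains S char then PySem.Set.discard S char
        else PySem.Set.add S char) (PySem.Set.empty : PySem.Set Char)).Nodup ∧
    ∀ c, c ∈ (l.foldl (fun S char =>
        if PySem.Set.contains S char then PySem.Set.discard S char
        else PySem.Set.add S char) (PySem.Set.empty : PySem.Set Char)) ↔ Odd (l.count c) := by
  induction l using List.reverseRecOn with
  | nil => simp [PySem.Set.empty]
  | append_singleton t x ih =>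
    obtain ⟨hnd, hmem⟩ := ih
    simp only [List.foldl_append, List.foldl_cons, List.foldl_nil]
    by_cases hx : x ∈ t.foldl (fun S char =>
        if PySem.Set.contains S char then PySem.Set.discard S char
        else PySem.Set.add S char) (PySem.Set.empty : PySem.Set Char)
    · rw [if_pos ((PySem.Set.contains_iff _ _).2 hx)]
      refine ⟨PySem.Set.nodup_discard _ _ hnd, fun c => ?_⟩
      rw [PySem.Set.mem_discard]
      by_cases hcx : c = x
      · subst hcx
        have hodd : Odd (t.count c) := (hmem c).1 hx
        simp only [List.count_append, List.count_singleton]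
        simp [Nat.odd_iff] at hodd ⊢
        omega
      · have hct : (t ++ [x]).count c = t.count c := by
          simp [List.count_append, List.count_eq_zero, hcx]
        rw [hct]
        exact ⟨fun h => (hmem c).1 h.1, fun h => ⟨(hmem c).2 h, hcx⟩⟩
    · rw [if_neg (fun hc => hx ((PySem.Set.contains_iff _ _).1 hc))]
      refine ⟨PySem.Set.nodup_add _ _ hnd, fun c => ?_⟩
      rw [PySem.Set.mem_add]
      by_cases hcx : c = x
      · subst hcx
        have hnodd : ¬ Odd (t.count c) := fun h => hx ((hmem c).2 h)
        simp only [List.count_append, List.count_singleton]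
        simp [Nat.odd_iff] at hnodd ⊢
        omega
      · have hct : (t ++ [x]).count c = t.count c := by
          simp [List.count_append, List.count_eq_zero, hcx]
        rw [hct]
        exact ⟨fun h => (hmem c).1 (h.resolve_right hcx), fun h => Or.inl ((hmem c).2 h)⟩

-- sum of a 0/1 parity list vs count of odd entries, mod 2
theorem pv_sum_parity (ns : List Nat) :
    ns.sum % 2 = (ns.countP (fun n => decide (Odd n))) % 2 := by
  induction ns with
  | nil => rfl
  | cons a t ih =>
    simp only [List.sum_cons, List.countP_cons]
    rcases Nat.even_or_odd a with h | h
    · have h2 : a % 2 = 0 := Nat.even_iff.1 h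
      simp [Nat.not_odd_iff_even.2 h]
      omega
    · have h2 : a % 2 = 1 := Nat.odd_iff.1 h
      simp [h]
      omega

-- the shared quantity: number of distinct characters with odd multiplicity
theorem pv_main (l : List Char) :
    (decide (((l.foldl (fun S char =>
        if PySem.Set.contains S char then PySem.Set.discard S char
        else PySem.Set.add S char) (PySem.Set.empty : PySem.Set Char)).length : Int)
          = PySem.Int.mod (l.length : Int) 2))
    = decide ((((PySem.List.dedup l).map
        (fun k => if PySem.Int.mod ((l.count k : Nat) : Int) 2 ≠ 0 then (1 : Int) else 0)).sum) ≤ 1) := by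
  obtain ⟨hnd, hmem⟩ := pv_toggle_spec l
  -- B's sum is the count N of distinct odd-multiplicity characters
  have hsum : ((PySem.List.dedup l).map
      (fun k => if PySem.Int.mod ((l.count k : Nat) : Int) 2 ≠ 0 then (1 : Int) else 0)).sum
      = ((PySem.List.dedup l).countP (fun k => decide (Odd (l.count k))) : Int) := by
    have := PySem.List.sum_map_ite_one_zero
      (fun k : Char => decide (Odd (l.count k))) (PySem.List.dedup l)
    rw [← this]
    refine congrArg List.sum (List.map_congr_left fun k _ => ?_)
    have hm : PySem.Int.mod ((l.count k : Nat) : Int) 2 = ((l.count k % 2 : Nat) : Int) := by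
      exact_mod_cast PySem.Int.mod_natCast (l.count k) 2
    rw [hm]
    rcases Nat.even_or_odd (l.count k) with h | h
    · simp [Nat.not_odd_iff_even.2 h, Nat.even_iff.1 h]
    · simp [h, Nat.odd_iff.1 h]
  set N := (PySem.List.dedup l).countP (fun k => decide (Odd (l.count k))) with hN
  -- A's set has exactly N elements
  have hlen : (l.foldl (fun S char =>
      if PySem.Set.contains S char then PySem.Set.discard S char
      else PySem.Set.add S char) (PySem.Set.empty : PySem.Set Char)).length = N := by
    have hperm : (l.foldl (fun S char =>
        if PySem.Set.contains S char then PySem.Set.discard S char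
        else PySem.Set.add S char) (PySem.Set.empty : PySem.Set Char)).Perm
        ((PySem.List.dedup l).filter (fun k => decide (Odd (l.count k)))) := by
      rw [List.perm_ext_iff_of_nodup hnd ((PySem.List.nodup_dedup l).filter _)]
      intro c
      rw [hmem c, List.mem_filter, PySem.List.mem_dedup]
      constructor
      · intro h
        exact ⟨List.count_pos_iff.1 (Nat.pos_of_ne_zero (by rintro h0; rw [h0] at h; simp at h)),
               decide_eq_true h⟩
      · intro h
        exact of_decide_eq_true h.2
    rw [hperm.length_eq, hN, List.countP_eq_length_filter]
  -- parity: N and l.length agree mod 2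
  have hpar : N % 2 = l.length % 2 := by
    have h1 : ((l.dedup).map (fun c => l.count c)).sum = l.length :=
      List.sum_map_count_dedup_eq_length l
    have hperm2 : (PySem.List.dedup l).Perm l.dedup := by
      rw [List.perm_ext_iff_of_nodup (PySem.List.nodup_dedup l) l.nodup_dedup]
      intro c
      rw [PySem.List.mem_dedup, List.mem_dedup]
    have h2 : ((PySem.List.dedup l).map (fun c => l.count c)).sum = l.length := by
      rw [(hperm2.map (fun c => l.count c)).sum_eq, h1]
    have h3 := pv_sum_parity ((PySem.List.dedup l).map (fun c => l.count c))
    rw [h2, List.countP_map] at h3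
    simp only [Function.comp_def] at h3
    rw [hN]
    omega
  -- both decisions reduce to the same arithmetic fact
  rw [hlen, hsum]
  have hm : PySem.Int.mod (l.length : Int) 2 = ((l.length % 2 : Nat) : Int) :=
    PySem.Int.mod_natCast l.length 2
  rw [hm, decide_eq_decide]
  omega

-- ===== VERDICT (by name: the statement is the Claim_ definition above) =====
theorem solve_spec : Claim_equal_solve := by
  intro s _
  have hv : (PySem.Dict.counter s.toList).values
      = (PySem.Set.ofList s.toList).map (fun k => ((s.toList.count k : Nat) : Int)) := by
    show ((PySem.Dict.counter s.toList).items.map Prod.snd) = _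
    rw [PySem.Dict.items_counter, List.map_map]
    rfl
  show solve s = solve_alt s
  unfold solve solve_alt
  change (decide (((s.toList.foldl (fun S char =>
      if PySem.Set.contains S char then PySem.Set.discard S char
      else PySem.Set.add S char) (PySem.Set.empty : PySem.Set Char)).length : Int)
        = PySem.Int.mod (s.toList.length : Int) 2))
    = decide ((((PySem.Dict.counter s.toList).values.map
        (fun v => if PySem.Int.mod v 2 ≠ 0 then (1 : Int) else 0)).sum) ≤ 1)
  rw [hv, List.map_map, ← PySem.List.dedup_eq_ofList]
  have := pv_main s.toList
  simpa [Function.comp_def] using this
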